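-- pv_equiv track=rewrite | github.com/abdelneuhaus/SFPA | get_length_on_off.py | get_length_on
-- ===== SOURCE A (Python) =====
-- def get_length_on(random_list):
--     retlist = []
--     count = 1
--     i = 1
--     while i < len(random_list):
--         if random_list[i] == random_list[i-1] + 1:
--             count += 1
--         else:
--             retlist.append(count)
--             count = 1
--         i += 1
--     retlist.append(count)
--     return retlist
-- ===== SOURCE B (Python) =====
-- def get_length_on(random_list):
--     if not random_list:
--         return []
--     n = len(random_list)
--     breaks = [i for i in range(1, n) if random_list[i] != random_list[i-1] + 1]
--     boundaries = [0] + breaks + [n]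
--     return [b - a for a, b in zip(boundaries, boundaries[1:])]
-- ===== Notes on version B (the rewrite author's own statement) =====
-- stated objective: alternative
-- what changed: B first collects break positions with a comprehension, forms boundaries [0]+breaks+[n], and returns consecutive boundary differences, instead of A's single accumulator-driven scan that counts run lengths in place.
-- intended difference: On the empty list A returns [1] (it unconditionally appends the trailing counter), while B returns [] since an empty list has no runs, which is the intended value. — e.g. on get_length_on([]): A returns [1], B returns []
import Mathlib
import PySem

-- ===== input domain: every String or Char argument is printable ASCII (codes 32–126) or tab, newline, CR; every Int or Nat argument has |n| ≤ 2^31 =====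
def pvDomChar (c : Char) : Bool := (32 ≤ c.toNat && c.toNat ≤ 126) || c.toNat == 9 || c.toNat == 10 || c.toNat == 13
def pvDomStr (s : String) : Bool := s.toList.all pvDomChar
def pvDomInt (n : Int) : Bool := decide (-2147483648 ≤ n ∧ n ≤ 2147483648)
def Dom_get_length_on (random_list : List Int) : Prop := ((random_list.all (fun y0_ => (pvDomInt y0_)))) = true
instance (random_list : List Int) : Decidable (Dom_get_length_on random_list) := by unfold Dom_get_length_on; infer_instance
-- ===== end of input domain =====

-- B rebuilds the run lengths via break positions and boundary differences (alternative decomposition,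
-- same O(n) cost); on the empty list A returns [1] (leftover trailing counter) while B returns [],
-- the intended value — stated as D_get_length_on below.


-- ===== PORT A =====
-- while loop over i = 1..n-1 with state (retlist, count); indices are always in range, so
-- random_list[i] is ported as (pyGet? …).getD 0 (the default is never used)
def get_length_on (random_list : List Int) : List Int :=
  let st := (PySem.List.pyRange 1 (random_list.length : Int) 1).foldl
    (fun (s : List Int × Int) i =>
      if (PySem.List.pyGet? random_list i).getD 0
           = (PySem.List.pyGet? random_list (i - 1)).getD 0 + 1 then
        (s.1, s.2 + 1)
      else
        (s.1 ++ [s.2], 1))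
    ([], 1)
  st.1 ++ [st.2]

-- ===== PORT B =====
-- breaks by comprehension, boundaries = [0] ++ breaks ++ [n], then pairwise differences via zip
def get_length_on_alt (random_list : List Int) : List Int :=
  if random_list = [] then []
  else
    let n : Int := (random_list.length : Int)
    let breaks := (PySem.List.pyRange 1 n 1).filter
      (fun i => !((PySem.List.pyGet? random_list i).getD 0
                   = (PySem.List.pyGet? random_list (i - 1)).getD 0 + 1 : Bool))
    let boundaries := [(0 : Int)] ++ breaks ++ [n]
    (boundaries.zip boundaries.tail).map (fun ab => ab.2 - ab.1)

-- ===== PRECONDITION & SPEC =====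
-- On the empty list A returns [1] because it always appends the trailing counter; B returns [],
-- the intended value (an empty list has no runs).
def D_get_length_on (random_list : List Int) : Prop := random_list = []
instance (random_list : List Int) : Decidable (D_get_length_on random_list) := by unfold D_get_length_on; infer_instance
def Spec_get_length_on (random_list : List Int) (out : List Int) : Prop := ¬ D_get_length_on random_list → out = get_length_on_alt random_list
instance (random_list : List Int) (out : List Int) : Decidable (Spec_get_length_on random_list out) := by unfold Spec_get_length_on; infer_instance
def pvDiffWitness_get_length_on : List Int := []
def pvDiffWitnessOut_get_length_on : (List Int) × (List Int) := ([1], [])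

-- ===== CLAIM (what is proved, stated in full; the proofs are below) =====
def Claim_unchanged_get_length_on : Prop := ∀ (random_list : List Int), Dom_get_length_on random_list → Spec_get_length_on random_list (get_length_on random_list)
def Claim_changed_get_length_on : Prop := Dom_get_length_on (pvDiffWitness_get_length_on) ∧ D_get_length_on (pvDiffWitness_get_length_on) ∧ get_length_on (pvDiffWitness_get_length_on) = pvDiffWitnessOut_get_length_on.1 ∧ get_length_on_alt (pvDiffWitness_get_length_on) = pvDiffWitnessOut_get_length_on.2 ∧ pvDiffWitnessOut_get_length_on.1 ≠ pvDiffWitnessOut_get_length_on.2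
def Claim_exact_get_length_on : Prop := ∀ (random_list : List Int), Dom_get_length_on random_list → D_get_length_on random_list → get_length_on random_list ≠ get_length_on_alt random_list

-- ===== LEMMAS AND PROOFS =====

-- consecutive differences starting from a given left boundary
def pvDiffs (a : Int) : List Int → List Int
  | [] => []
  | b :: t => (b - a) :: pvDiffs b t

theorem pvZip_diffs (a : Int) (t : List Int) :
    (((a :: t).zip t).map (fun ab => ab.2 - ab.1)) = pvDiffs a t := by
  induction t generalizing a with
  | nil => rfl
  | cons b t ih =>
    simp only [List.zip_cons_cons, List.map_cons, pvDiffs]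
    exact congrArg _ (ih b)

-- the core invariant: folding A's step over consecutive indices j..n-1 from state (r, c),
-- where the left boundary of the current run is j - c, produces r ++ the boundary differences
theorem pvFold_inv (p : Int → Bool) (n : Int) :
    ∀ (j : Int), j ≤ n → ∀ (r : List Int) (c : Int),
    ((PySem.List.pyRange j n 1).foldl
        (fun (s : List Int × Int) i => if p i then (s.1, s.2 + 1) else (s.1 ++ [s.2], 1)) (r, c)).1
      ++ [((PySem.List.pyRange j n 1).foldl
        (fun (s : List Int × Int) i => if p i then (s.1, s.2 + 1) else (s.1 ++ [s.2], 1)) (r, c)).2]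
      = r ++ pvDiffs (j - c) (((PySem.List.pyRange j n 1).filter (fun i => !(p i))) ++ [n]) := by
  intro j
  induction hwf : (n - j).toNat generalizing j with
  | zero =>
    intro hj r c
    have hnj : n ≤ j := by omega
    simp [PySem.List.pyRange_one_eq_nil hnj, pvDiffs]
    omega
  | succ k ih =>
    intro hj r c
    have hjn : j < n := by omega
    rw [PySem.List.pyRange_one_cons hjn]
    by_cases hp : p j = true
    · have := ih (j + 1) (by omega) (by omega) r (c + 1)
      simp only [List.foldl_cons, List.filter_cons, hp]
      simpa [show j + 1 - (c + 1) = j - c by omega] using this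
    · have hp' : p j = false := by simpa using hp
      have := ih (j + 1) (by omega) (by omega) (r ++ [c]) 1
      simp only [List.foldl_cons, List.filter_cons, hp']
      simp only [Bool.false_eq_true, if_false, Bool.not_false, if_true] at this ⊢
      rw [this]
      have : j - (j - c) = c := by omega
      simp [pvDiffs, this]

theorem get_length_on_eq_alt (xs : List Int) (hne : xs ≠ []) :
    get_length_on xs = get_length_on_alt xs := by
  have hlen : (1 : Int) ≤ (xs.length : Int) := by
    have : 0 < xs.length := List.length_pos_iff.mpr hne
    omega
  have h := pvFold_inv
    (fun i => decide ((PySem.List.pyGet? xs i).getD 0 = (PySem.List.pyGet? xs (i - 1)).getD 0 + 1))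
    (xs.length : Int) 1 hlen [] 1
  have hz := pvZip_diffs 0
    (((PySem.List.pyRange 1 (xs.length : Int) 1).filter
        (fun i => !decide ((PySem.List.pyGet? xs i).getD 0
                    = (PySem.List.pyGet? xs (i - 1)).getD 0 + 1))) ++ [(xs.length : Int)])
  simp only [decide_eq_true_eq] at h hz
  simp only [get_length_on, get_length_on_alt, if_neg hne]
  rw [h]
  have e : (1 : Int) - 1 = 0 := by norm_num
  rw [List.nil_append, e, ← hz]
  simp

-- ===== VERDICT (by name: the statement is the Claim_ definition above) =====
theorem get_length_on_spec : Claim_unchanged_get_length_on := by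
  intro xs _ hD
  exact get_length_on_eq_alt xs hD

theorem get_length_on_changed : Claim_changed_get_length_on := by
  unfold Claim_changed_get_length_on; decide

theorem get_length_on_tight : Claim_exact_get_length_on := by
  intro xs _ hD
  subst hD
  decide
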